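-- pv_equiv track=rewrite | github.com/EitanMohorade/IP-UBA-ejercicios | Ejercicios/Python/Guia_10/ejer_3.py | subsecuencias
-- ===== SOURCE A (Python) =====
-- def subsecuencias(tipos_pacientes_atendidos: list[str]) -> list[list[str]]:
--     subsecuencia: list[list[tuple[str, int]]] = []
--     aux: list[tuple[str, int]] = []
--     for i in range(0, len(tipos_pacientes_atendidos)):
--         if tipos_pacientes_atendidos[i] == "perro" or tipos_pacientes_atendidos[i] == "gato":
--             aux.append((tipos_pacientes_atendidos[i], i))
--         else:
--             subsecuencia.append(aux)
--             aux = []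
--     if aux != []:
--         subsecuencia.append(aux)
--     return subsecuencia
-- ===== SOURCE B (Python) =====
-- def subsecuencias(tipos_pacientes_atendidos: list[str]) -> list[list[str]]:
--     # Two-pass: first collect separator indices, then cut slices between them.
--     seps = [i for i, t in enumerate(tipos_pacientes_atendidos)
--             if t != "perro" and t != "gato"]
--     res = []
--     start = 0
--     for s in seps:
--         res.append([(tipos_pacientes_atendidos[j], j) for j in range(start, s)])
--         start = s + 1
--     tail = [(tipos_pacientes_atendidos[j], j)
--             for j in range(start, len(tipos_pacientes_atendidos))]
--     if tail:
--         res.append(tail)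
--     return res
-- ===== Notes on version B (the rewrite author's own statement) =====
-- stated objective: alternative
-- what changed: Instead of one element-by-element loop carrying a growing run accumulator, B first builds the list of separator indices and then slices the runs out between consecutive separators in a second pass over those indices.
import Mathlib
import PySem

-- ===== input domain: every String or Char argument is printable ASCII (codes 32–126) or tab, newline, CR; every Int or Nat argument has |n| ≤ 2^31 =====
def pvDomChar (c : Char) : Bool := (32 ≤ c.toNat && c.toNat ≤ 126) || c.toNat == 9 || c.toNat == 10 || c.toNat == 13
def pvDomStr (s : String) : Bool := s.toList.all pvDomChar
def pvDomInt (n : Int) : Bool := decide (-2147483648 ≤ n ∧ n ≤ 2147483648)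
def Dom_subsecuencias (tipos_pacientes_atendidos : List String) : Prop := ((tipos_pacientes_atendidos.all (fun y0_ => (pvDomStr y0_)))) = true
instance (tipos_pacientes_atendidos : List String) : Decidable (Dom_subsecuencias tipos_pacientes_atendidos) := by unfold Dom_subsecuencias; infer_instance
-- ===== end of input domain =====

-- B replaces A's single accumulator loop by a two-pass scheme: collect the separator
-- indices first, then slice out the runs between consecutive separators (alternative
-- decomposition, same cost).


-- ===== PORT A =====
-- A's loop body: append to the current run on "perro"/"gato", otherwise flush it.
def pvStepA (ts : List String)
    (st : List (List (String × Int)) × List (String × Int)) (i : Int) :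
    List (List (String × Int)) × List (String × Int) :=
  let t := PySem.List.pyGetD ts i ""
  if t == "perro" || t == "gato" then (st.1, st.2 ++ [(t, i)])
  else (st.1 ++ [st.2], [])

def subsecuencias (tipos_pacientes_atendidos : List String) : List (List (String × Int)) :=
  let st := (PySem.List.pyRange 0 (tipos_pacientes_atendidos.length : Int) 1).foldl
    (pvStepA tipos_pacientes_atendidos) ([], [])
  if st.2 ≠ [] then st.1 ++ [st.2] else st.1

-- ===== PORT B =====
-- the slice [(ts[j], j) for j in range(a, b)]
def pvSeg (ts : List String) (a b : Int) : List (String × Int) :=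
  (PySem.List.pyRange a b 1).map (fun j => (PySem.List.pyGetD ts j "", j))

-- B's loop body over separator positions: cut the slice since `start`, move past the separator.
def pvStepB (ts : List String)
    (st : List (List (String × Int)) × Int) (s : Int) :
    List (List (String × Int)) × Int :=
  (st.1 ++ [pvSeg ts st.2 s], s + 1)

def subsecuencias_alt (tipos_pacientes_atendidos : List String) : List (List (String × Int)) :=
  let seps := ((PySem.List.enumerate tipos_pacientes_atendidos 0).filter
      (fun p => !(p.2 == "perro") && !(p.2 == "gato"))).map (·.1)
  let st := seps.foldl (pvStepB tipos_pacientes_atendidos) ([], 0)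
  let tail := pvSeg tipos_pacientes_atendidos st.2 (tipos_pacientes_atendidos.length : Int)
  if tail ≠ [] then st.1 ++ [tail] else st.1

-- ===== PRECONDITION & SPEC =====
def Spec_subsecuencias (tipos_pacientes_atendidos : List String) (out : List (List (String × Int))) : Prop := out = subsecuencias_alt tipos_pacientes_atendidos
instance (tipos_pacientes_atendidos : List String) (out : List (List (String × Int))) : Decidable (Spec_subsecuencias tipos_pacientes_atendidos out) := by unfold Spec_subsecuencias; infer_instance

-- ===== CLAIM (what is proved, stated in full; the proofs are below) =====
def Claim_equal_subsecuencias : Prop := ∀ (tipos_pacientes_atendidos : List String), Dom_subsecuencias tipos_pacientes_atendidos → Spec_subsecuencias tipos_pacientes_atendidos (subsecuencias tipos_pacientes_atendidos)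

-- ===== LEMMAS AND PROOFS =====

-- proof-side view of B's separator list restricted to indices ≥ k
def pvE (ts : List String) (k : Nat) : List Int :=
  ((PySem.List.enumerate (ts.drop k) (k : Int)).filter
    (fun p => !(p.2 == "perro") && !(p.2 == "gato"))).map (·.1)

lemma pvE_zero (ts : List String) :
    pvE ts 0 = ((PySem.List.enumerate ts 0).filter
      (fun p => !(p.2 == "perro") && !(p.2 == "gato"))).map (·.1) := by
  simp [pvE]

lemma pvE_last (ts : List String) : pvE ts ts.length = [] := by
  simp [pvE, PySem.List.enumerate_nil]

lemma pvE_succ (ts : List String) (k : Nat) (h : k < ts.length) :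
    pvE ts k = (if ts[k] == "perro" || ts[k] == "gato" then [] else [(k : Int)])
      ++ pvE ts (k + 1) := by
  have hd : ts.drop k = ts[k] :: ts.drop (k + 1) := List.drop_eq_getElem_cons h
  have hcast : ((k : Int)) + 1 = (((k + 1 : Nat)) : Int) := by push_cast; ring
  have hp : (!(ts[k] == "perro") && !(ts[k] == "gato"))
      = !(ts[k] == "perro" || ts[k] == "gato") := by rw [Bool.not_or]
  unfold pvE
  rw [hd, PySem.List.enumerate_cons, hcast, List.filter_cons]
  cases hc : (ts[k] == "perro" || ts[k] == "gato") <;> simp [hp, hc]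

lemma pvSeg_nil (ts : List String) (a : Int) : pvSeg ts a a = [] := by
  simp [pvSeg, PySem.List.pyRange_one_eq_nil le_rfl]

lemma pvGetD_eq (ts : List String) (k : Nat) (hk : k < ts.length) :
    PySem.List.pyGetD ts (k : Int) "" = ts[k] := by
  simp [List.getElem?_eq_getElem hk]

lemma pvSeg_succ (ts : List String) (a : Int) (k : Nat) (ha : a ≤ (k : Int))
    (hk : k < ts.length) :
    pvSeg ts a ((k : Int) + 1) = pvSeg ts a (k : Int) ++ [(ts[k], (k : Int))] := by
  simp only [pvSeg, PySem.List.pyRange_one_succ_right ha, List.map_append,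
    List.map_cons, List.map_nil, pvGetD_eq ts k hk]

lemma pvMain (ts : List String) (fuel : Nat) : ∀ (k start : Nat)
    (res : List (List (String × Int))),
    ts.length ≤ k + fuel → start ≤ k → k ≤ ts.length →
    (let st := (PySem.List.pyRange (k : Int) (ts.length : Int) 1).foldl
        (pvStepA ts) (res, pvSeg ts (start : Int) (k : Int));
     if st.2 ≠ [] then st.1 ++ [st.2] else st.1)
    = (let st := (pvE ts k).foldl (pvStepB ts) (res, (start : Int));
       let tail := pvSeg ts st.2 (ts.length : Int);
       if tail ≠ [] then st.1 ++ [tail] else st.1) := by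
  induction fuel with
  | zero =>
    intro k start res hf hsk hk
    have hkn : k = ts.length := by omega
    subst hkn
    simp [PySem.List.pyRange_one_eq_nil (le_refl _), pvE_last]
  | succ fuel ih =>
    intro k start res hf hsk hk
    rcases lt_or_eq_of_le hk with hlt | hkn
    · have hcast : ((k : Int)) < (ts.length : Int) := by exact_mod_cast hlt
      have hc1 : ((k : Int)) + 1 = (((k + 1 : Nat)) : Int) := by push_cast; ring
      rw [PySem.List.pyRange_one_cons hcast]
      simp only [List.foldl_cons]
      by_cases hc : (ts[k] == "perro" || ts[k] == "gato") = true
      · have hstep : pvStepA ts (res, pvSeg ts (start : Int) (k : Int)) (k : Int)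
            = (res, pvSeg ts (start : Int) (((k + 1 : Nat)) : Int)) := by
          simp only [pvStepA, pvGetD_eq ts k hlt]
          rw [if_pos hc, ← hc1, pvSeg_succ ts (start : Int) k (by exact_mod_cast hsk) hlt]
        have hE : pvE ts k = pvE ts (k + 1) := by
          rw [pvE_succ ts k hlt, hc]; simp
        rw [hstep, hE, hc1]
        exact ih (k + 1) start res (by omega) (by omega) (by omega)
      · have hstep : pvStepA ts (res, pvSeg ts (start : Int) (k : Int)) (k : Int)
            = (res ++ [pvSeg ts (start : Int) (k : Int)],
               pvSeg ts (((k + 1 : Nat)) : Int) (((k + 1 : Nat)) : Int)) := by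
          simp only [pvStepA, pvGetD_eq ts k hlt]
          rw [if_neg hc, pvSeg_nil]
        have hE : pvE ts k = (k : Int) :: pvE ts (k + 1) := by
          rw [pvE_succ ts k hlt]
          simp only [Bool.not_eq_true] at hc
          simp [hc]
        rw [hstep, hE]
        simp only [List.foldl_cons, pvStepB]
        rw [hc1]
        exact ih (k + 1) (k + 1) (res ++ [pvSeg ts (start : Int) (k : Int)])
          (by omega) (by omega) (by omega)
    · subst hkn
      simp [PySem.List.pyRange_one_eq_nil (le_refl ((ts.length : Int))), pvE_last]

-- ===== VERDICT (by name: the statement is the Claim_ definition above) =====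
theorem subsecuencias_spec : Claim_equal_subsecuencias := by
  intro ts _
  show subsecuencias ts = subsecuencias_alt ts
  have h := pvMain ts ts.length 0 0 [] (by omega) (by omega) (by omega)
  simpa [subsecuencias, subsecuencias_alt, pvSeg_nil, pvE_zero] using h
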